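-- pv_equiv track=rewrite | github.com/Pk13055/machine-learning | Scripts/normalization.py | process
-- ===== SOURCE A (Python) =====
-- def sanitize(unset_data):
-- 	return type(unset_data)(filter(lambda x: x != '', unset_data))
--
-- def process(unset_data):
-- 	m = len(unset_data)
-- 	n = len(sanitize(unset_data[0].split(' '))) - 1
-- 	feature_sets = [ [] for _ in range(n + 1) ]
-- 	yi = []
-- 	for _ in range(m):
-- 		unset_data[_] = unset_data[_].split(' ')
-- 		for i in range(n + 1):
-- 			feature_sets[i].append(unset_data[_][i])
-- 		yi.append(unset_data[_][-1])
-- 	return tuple([feature_sets, yi])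
-- ===== SOURCE B (Python) =====
-- def process(unset_data):
--     m = len(unset_data)
--     n = len([t for t in unset_data[0].split(' ') if t != '']) - 1
--     w = n + 1
--     flat = []
--     yi = []
--     for k in range(m):
--         row = unset_data[k].split(' ')
--         unset_data[k] = row
--         flat += row[:w]
--         yi.append(row[-1])
--     feature_sets = []
--     for i in range(w):
--         col = []
--         j = i
--         while j < len(flat):
--             col.append(flat[j])
--             j += w
--         feature_sets.append(col)
--     return (feature_sets, yi)
-- ===== Notes on version B (the rewrite author's own statement) =====
-- stated objective: alternative
-- what changed: B replaces A's per-column list-of-lists with interleaved appends by a single flat row-major token buffer built in one pass, from which each feature column is then extracted by stride-w index jumps (a while loop stepping j += w), i.e. a different data structure and traversal.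
import Mathlib
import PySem

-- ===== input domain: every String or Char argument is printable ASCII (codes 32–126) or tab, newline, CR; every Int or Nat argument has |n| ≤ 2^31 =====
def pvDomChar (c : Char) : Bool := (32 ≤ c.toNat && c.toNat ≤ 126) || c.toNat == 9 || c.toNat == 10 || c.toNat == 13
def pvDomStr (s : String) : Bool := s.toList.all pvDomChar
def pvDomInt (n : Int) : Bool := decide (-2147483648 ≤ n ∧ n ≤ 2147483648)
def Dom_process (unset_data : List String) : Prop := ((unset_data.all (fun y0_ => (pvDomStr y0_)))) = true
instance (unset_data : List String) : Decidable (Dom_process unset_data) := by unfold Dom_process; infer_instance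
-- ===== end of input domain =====

-- B builds one flat row-major token buffer in a single pass and then extracts each feature
-- column by stride-w index jumps, instead of A's per-column interleaved appends; objective:
-- alternative (different data structure/traversal). Return-value equivalence; both Pythons
-- mutate unset_data in place by splitting each row.

-- s.split(' '): PySem.Str.split? with the nonempty separator " " always returns some, so .getD [] is exact.
def pySplitSp (s : String) : List String := (PySem.Str.split? s " ").getD []

-- ===== PORT A =====
def sanitize (unset_data : List String) : List String :=
  unset_data.filter (fun x => x ≠ "")

-- Literal port of A: `for _ in range(m)` reads unset_data[_] exactly once (after writing its split),
-- so the loop is a foldl over the rows; row indexing row[i] / row[-1] uses pyGetD (Pre_ keeps it in range).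
def process (unset_data : List String) : List (List String) × List String :=
  let n : Int := (sanitize (pySplitSp (PySem.List.pyGetD unset_data 0 ""))).length - 1
  let feature_sets : List (List String) :=
    (PySem.List.pyRange 0 (n + 1) 1).map (fun _ => ([] : List String))
  let st := unset_data.foldl
    (fun (st : List (List String) × List String) rowStr =>
      let row := pySplitSp rowStr
      let fs := (PySem.List.pyRange 0 (n + 1) 1).foldl
        (fun fs i =>
          PySem.List.pySetD fs i (PySem.List.pyGetD fs i [] ++ [PySem.List.pyGetD row i ""]))
        st.1
      (fs, st.2 ++ [PySem.List.pyGetD row (-1) ""]))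
    (feature_sets, ([] : List String))
  (st.1, st.2)

-- ===== PORT B =====
-- B's `while j < len(flat): col.append(flat[j]); j += w` as the obvious structural recursion on j;
-- the `0 < w` conjunct only makes the recursion total (the loop is only reached with 1 ≤ w ≤ i-bound).
def pvStride (flat : List String) (w : Nat) (j : Nat) : List String :=
  if _h : j < flat.length ∧ 0 < w then flat.getD j "" :: pvStride flat w (j + w)
  else []
termination_by flat.length - j
decreasing_by omega

def process_alt (unset_data : List String) : List (List String) × List String :=
  let n : Int := ((pySplitSp (PySem.List.pyGetD unset_data 0 "")).filter (fun x => x ≠ "")).length - 1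
  let w : Int := n + 1
  let st := unset_data.foldl
    (fun (st : List String × List String) s =>
      let row := pySplitSp s
      (st.1 ++ PySem.List.slice row none (some w), st.2 ++ [PySem.List.pyGetD row (-1) ""]))
    (([] : List String), ([] : List String))
  let feature_sets := (PySem.List.pyRange 0 w 1).map (fun i => pvStride st.1 w.toNat i.toNat)
  (feature_sets, st.2)

-- ===== PRECONDITION & SPEC =====
-- Pre_ excludes exactly the inputs on which Python A raises IndexError: the empty list
-- (unset_data[0]) and lists where some row splits into fewer than n+1 tokens (row[i]).
def Pre_process (unset_data : List String) : Prop :=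
  unset_data ≠ [] ∧
  ∀ s ∈ unset_data,
    ((pySplitSp (unset_data.headI)).filter (fun x => x ≠ "")).length
      ≤ (pySplitSp s).length
instance (unset_data : List String) : Decidable (Pre_process unset_data) := by
  unfold Pre_process; infer_instance
def pvWitness_process : List String := ["1 2 9", "4 5 6"]
def Spec_process (unset_data : List String) (out : List (List String) × List String) : Prop := out = process_alt unset_data
instance (unset_data : List String) (out : List (List String) × List String) : Decidable (Spec_process unset_data out) := by unfold Spec_process; infer_instance

-- ===== CLAIM (what is proved, stated in full; the proofs are below) =====
def Claim_equal_process : Prop := ∀ (unset_data : List String), Dom_process unset_data → Pre_process unset_data → Spec_process unset_data (process unset_data)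

-- ===== LEMMAS AND PROOFS =====

-- (range xs.length).map getD reconstructs the list
theorem pv_map_range_getD (xs : List (List String)) :
    (List.range xs.length).map (fun j => xs.getD j []) = xs := by
  apply List.ext_getElem
  · simp
  · intro i h1 h2
    simp only [List.getElem_map, List.getElem_range]
    exact List.getD_eq_getElem xs [] h2

-- A's inner loop: the per-index set/append fold acts pointwise on the prefix of length L
theorem pv_inner (g : Nat → String) (L : Nat) (fs : List (List String)) (h : L ≤ fs.length) :
    (List.range L).foldl (fun a k => a.set k (a.getD k [] ++ [g k])) fs
      = (List.range fs.length).map (fun j => if j < L then fs.getD j [] ++ [g j] else fs.getD j []) := by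
  induction L with
  | zero =>
    simp only [List.range_zero, List.foldl_nil, Nat.not_lt_zero, if_false]
    exact (pv_map_range_getD fs).symm
  | succ L ih =>
    rw [List.range_succ, List.foldl_append, ih (Nat.le_of_succ_le h)]
    simp only [List.foldl_cons, List.foldl_nil]
    have hL : L < fs.length := h
    apply List.ext_getElem
    · simp
    · intro j hj hj'
      have hjlen : j < fs.length := by simpa using hj'
      rw [List.getElem_set]
      have hgetD : ∀ (m : Nat) (hm : m < fs.length),
          ((List.range fs.length).map
            (fun j => if j < L then fs.getD j [] ++ [g j] else fs.getD j [])).getD m []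
          = if m < L then fs.getD m [] ++ [g m] else fs.getD m [] := by
        intro m hm
        rw [List.getD_eq_getElem _ _ (by simpa using hm)]
        simp
      simp only [List.getElem_map, List.getElem_range]
      by_cases h1 : L = j
      · subst h1
        rw [if_pos (Nat.lt_succ_self L), hgetD L hL, if_neg (lt_irrefl L)]
        simp
      · rw [if_neg h1]
        by_cases h2 : j < L
        · rw [if_pos h2, if_pos (by omega)]
        · rw [if_neg h2, if_neg (by omega)]

-- A's outer loop invariant: folding the rows extends every column and yi by one entry per row
theorem pv_outer (L : Nat) (ss : List String) (p : List String) :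
    ss.foldl
      (fun (st : List (List String) × List String) s =>
        ((List.range L).foldl
            (fun a k => a.set k (a.getD k [] ++ [(pySplitSp s).getD k ""])) st.1,
         st.2 ++ [PySem.List.pyGetD (pySplitSp s) (-1) ""]))
      ((List.range L).map (fun k => p.map (fun r => (pySplitSp r).getD k "")),
       p.map (fun r => PySem.List.pyGetD (pySplitSp r) (-1) ""))
    = ((List.range L).map (fun k => (p ++ ss).map (fun r => (pySplitSp r).getD k "")),
       (p ++ ss).map (fun r => PySem.List.pyGetD (pySplitSp r) (-1) "")) := by
  induction ss generalizing p with
  | nil => simp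
  | cons s rest ih =>
    rw [List.foldl_cons]
    have hfs :
        (List.range L).foldl
            (fun a k => a.set k (a.getD k [] ++ [(pySplitSp s).getD k ""]))
            ((List.range L).map (fun k => p.map (fun r => (pySplitSp r).getD k "")))
          = (List.range L).map (fun k => (p ++ [s]).map (fun r => (pySplitSp r).getD k "")) := by
      rw [pv_inner _ L _ (by simp)]
      apply List.ext_getElem
      · simp
      · intro j hj hj'
        have hjL : j < L := by simpa using hj'
        simp only [List.length_map, List.length_range] at hj
        simp only [List.getElem_map, List.getElem_range, if_pos hjL]
        rw [List.getD_eq_getElem _ _ (by simpa using hjL)]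
        simp
    rw [hfs]
    have := ih (p ++ [s])
    simpa using this

-- A's value in canonical (column = map over rows) form
theorem pv_A_canon (unset_data : List String)
    (L : Nat)
    (hL : L = ((pySplitSp (PySem.List.pyGetD unset_data 0 "")).filter (fun x => x ≠ "")).length) :
    process unset_data
      = ((List.range L).map (fun k => unset_data.map (fun r => (pySplitSp r).getD k "")),
         unset_data.map (fun r => PySem.List.pyGetD (pySplitSp r) (-1) "")) := by
  simp only [process, sanitize, ← hL]
  have hn : (L : Int) - 1 + 1 = (L : Int) := by omega
  rw [hn]
  have hr : PySem.List.pyRange 0 (L : Int) 1 = (List.range L).map (fun k : Nat => (k : Int)) := by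
    rw [PySem.List.pyRange_one]
    simp only [zero_add, sub_zero, Int.toNat_natCast]
  rw [hr]
  simp only [List.foldl_map, List.map_map, Function.comp_def,
    PySem.List.pySetD_natCast, PySem.List.pyGetD_natCast]
  have h := pv_outer L unset_data []
  simp only [List.nil_append, List.map_nil] at h
  rw [h]

-- unfolding equations for pvStride
theorem pvStride_step (flat : List String) (w j : Nat) (h : j < flat.length ∧ 0 < w) :
    pvStride flat w j = flat.getD j "" :: pvStride flat w (j + w) := by
  rw [pvStride]; exact dif_pos h

theorem pvStride_stop (flat : List String) (w j : Nat) (h : ¬ (j < flat.length ∧ 0 < w)) :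
    pvStride flat w j = [] := by
  rw [pvStride]; exact dif_neg h

-- stride skips a leading chunk of length w
theorem pvStride_append (chunk rest : List String) (w j : Nat) (h : chunk.length = w) :
    pvStride (chunk ++ rest) w (w + j) = pvStride rest w j := by
  rcases Nat.eq_zero_or_pos w with hw | hw
  · rw [pvStride_stop _ _ _ (by rintro ⟨_, h2⟩; omega),
        pvStride_stop _ _ _ (by rintro ⟨_, h2⟩; omega)]
  · have hfuel : ∀ (fuel j : Nat), rest.length ≤ j + fuel →
        pvStride (chunk ++ rest) w (w + j) = pvStride rest w j := by
      intro fuel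
      induction fuel with
      | zero =>
        intro j hj
        rw [pvStride_stop _ _ _ (by rintro ⟨h1, _⟩; simp [List.length_append, h] at h1; omega),
            pvStride_stop _ _ _ (by rintro ⟨h1, _⟩; omega)]
      | succ fuel ih =>
        intro j hj
        by_cases hjl : j < rest.length
        · rw [pvStride_step _ _ _ ⟨by simp [List.length_append, h]; omega, hw⟩,
              pvStride_step _ _ _ ⟨hjl, hw⟩]
          have hget : (chunk ++ rest).getD (w + j) "" = rest.getD j "" := by
            rw [List.getD_eq_getElem _ _ (by simp [List.length_append, h]; omega),
                List.getD_eq_getElem _ _ hjl,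
                List.getElem_append_right (by omega)]
            congr 1
            omega
          rw [hget, show w + j + w = w + (j + w) by omega, ih (j + w) (by omega)]
        · rw [pvStride_stop _ _ _ (by rintro ⟨h1, _⟩; simp [List.length_append, h] at h1; omega),
              pvStride_stop _ _ _ (by rintro ⟨h1, _⟩; omega)]
    exact hfuel rest.length j (by omega)

-- stride over a flat concatenation of equal-length chunks extracts column i
theorem pvStride_flatten (w : Nat) (rows : List (List String))
    (h : ∀ c ∈ rows, c.length = w) (i : Nat) (hi : i < w) :
    pvStride rows.flatten w i = rows.map (fun c => c.getD i "") := by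
  induction rows with
  | nil =>
    rw [pvStride_stop _ _ _ (by rintro ⟨h1, _⟩; simp at h1)]
    simp
  | cons c rest ih =>
    have hc : c.length = w := h c (by simp)
    rw [List.flatten_cons,
        pvStride_step _ _ _ ⟨by simp [List.length_append, hc]; omega, by omega⟩]
    have hget : (c ++ rest.flatten).getD i "" = c.getD i "" := by
      rw [List.getD_eq_getElem _ _ (by simp [hc]; omega),
          List.getD_eq_getElem _ _ (by omega),
          List.getElem_append_left (by omega)]
    rw [hget, show i + w = w + i by omega, pvStride_append _ _ _ _ hc,
        ih (fun c hc' => h c (by simp [hc']))]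
    simp

-- B's outer loop: the pair fold builds the flat buffer and yi
theorem pv_outerB (L : Nat) (ss : List String) (p1 p2 : List String) :
    ss.foldl
      (fun (st : List String × List String) s =>
        (st.1 ++ (pySplitSp s).take L,
         st.2 ++ [PySem.List.pyGetD (pySplitSp s) (-1) ""]))
      (p1, p2)
    = (p1 ++ (ss.map (fun s => (pySplitSp s).take L)).flatten,
       p2 ++ ss.map (fun s => PySem.List.pyGetD (pySplitSp s) (-1) "")) := by
  induction ss generalizing p1 p2 with
  | nil => simp
  | cons s rest ih =>
    rw [List.foldl_cons, ih]
    simp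

-- B's value in the same canonical form, under Pre_
theorem pv_B_canon (unset_data : List String) (hpre : Pre_process unset_data)
    (L : Nat)
    (hL : L = ((pySplitSp (PySem.List.pyGetD unset_data 0 "")).filter (fun x => x ≠ "")).length) :
    process_alt unset_data
      = ((List.range L).map (fun k => unset_data.map (fun r => (pySplitSp r).getD k "")),
         unset_data.map (fun r => PySem.List.pyGetD (pySplitSp r) (-1) "")) := by
  obtain ⟨hne, hlen⟩ := hpre
  have hhead : PySem.List.pyGetD unset_data 0 "" = unset_data.headI := by
    cases unset_data with
    | nil => exact absurd rfl hne
    | cons a l => simp [PySem.List.pyGetD, PySem.List.pyGet?, PySem.List.pyIdx?]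
  have hrowlen : ∀ s ∈ unset_data, L ≤ (pySplitSp s).length := by
    intro s hs
    rw [hL, hhead]
    exact hlen s hs
  simp only [process_alt, ← hL]
  have hn : (L : Int) - 1 + 1 = (L : Int) := by omega
  rw [hn]
  have hslice : ∀ (r : List String),
      PySem.List.slice r none (some (L : Int)) = r.take L := by
    intro r
    exact PySem.List.slice_to_natCast r L
  have hfold := pv_outerB L unset_data [] []
  simp only [hslice]
  rw [hfold]
  simp only [List.nil_append]
  congr 1
  · have hr : PySem.List.pyRange 0 (L : Int) 1 = (List.range L).map (fun k : Nat => (k : Int)) := by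
      rw [PySem.List.pyRange_one]
      simp only [zero_add, sub_zero, Int.toNat_natCast]
    rw [hr, List.map_map]
    apply List.map_congr_left
    intro k hk
    have hkL : k < L := List.mem_range.mp hk
    simp only [Function.comp_def, Int.toNat_natCast]
    rw [pvStride_flatten L _ (by
        intro c hc
        obtain ⟨s, hs, rfl⟩ := List.mem_map.mp hc
        exact List.length_take_of_le (hrowlen s hs)) k hkL]
    rw [List.map_map]
    apply List.map_congr_left
    intro s hs
    simp only [Function.comp_def]
    have hsl : L ≤ (pySplitSp s).length := hrowlen s hs
    rw [List.getD_eq_getElem _ _ (by simp; omega),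
        List.getD_eq_getElem _ _ (by omega),
        List.getElem_take]

theorem pv_main (unset_data : List String) (hpre : Pre_process unset_data) :
    process unset_data = process_alt unset_data := by
  rw [pv_A_canon unset_data _ rfl, pv_B_canon unset_data hpre _ rfl]

-- ===== VERDICT (by name: the statement is the Claim_ definition above) =====
theorem process_spec : Claim_equal_process := by
  intro ud _ hpre
  unfold Spec_process
  exact pv_main ud hpre
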